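-- pv_equiv track=rewrite | github.com/jacobcd52/simple_obfuscation | src/reward/specific_poly_reward.py | _split_factors
-- ===== SOURCE A (Python) =====
-- from typing import Dict, List
--
-- def _split_factors(expr: str) -> List[str]:
--     s = expr.replace(" ", "")
--     factors: List[str] = []
--     i = 0
--     n = len(s)
--     while i < n:
--         ch = s[i]
--         if ch == '*':
--             i += 1
--             continue
--         if ch == '(':
--             depth = 1
--             j = i + 1
--             while j < n and depth > 0:
--                 if s[j] == '(': depth += 1
--                 elif s[j] == ')': depth -= 1
--                 j += 1
--             if depth != 0:
--                 token = s[i:]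
--                 i = n
--             else:
--                 token = s[i:j]
--                 i = j
--             factors.append(token)
--             continue
--         # bare token until next paren or *
--         j = i
--         while j < n and s[j] not in '()*':
--             j += 1
--         if j == i:
--             i += 1
--             continue
--         token = s[i:j]
--         factors.append(token)
--         i = j
--     return [f for f in factors if f]
-- ===== SOURCE B (Python) =====
-- from typing import List
--
-- def _split_factors(expr: str) -> List[str]:
--     s = expr.replace(" ", "")
--     factors: List[str] = []
--     buf = ""
--     depth = 0
--     for ch in s:
--         if depth == 0:
--             if ch == '*':
--                 if buf:
--                     factors.append(buf)
--                     buf = ""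
--             elif ch == '(':
--                 if buf:
--                     factors.append(buf)
--                     buf = ""
--                 buf = '('
--                 depth = 1
--             elif ch == ')':
--                 if buf:
--                     factors.append(buf)
--                     buf = ""
--             else:
--                 buf += ch
--         else:
--             buf += ch
--             if ch == '(':
--                 depth += 1
--             elif ch == ')':
--                 depth -= 1
--                 if depth == 0:
--                     factors.append(buf)
--                     buf = ""
--     if buf:
--         factors.append(buf)
--     return factors
-- ===== Notes on version B (the rewrite author's own statement) =====
-- stated objective: simpler
-- what changed: Replaced A's index-based outer loop with nested inner rescanning loops (matching-paren scan and bare-token scan) by a single character-streaming pass that carries only a paren-depth counter and a current-token buffer, flushing the buffer at token boundaries.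
import Mathlib
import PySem

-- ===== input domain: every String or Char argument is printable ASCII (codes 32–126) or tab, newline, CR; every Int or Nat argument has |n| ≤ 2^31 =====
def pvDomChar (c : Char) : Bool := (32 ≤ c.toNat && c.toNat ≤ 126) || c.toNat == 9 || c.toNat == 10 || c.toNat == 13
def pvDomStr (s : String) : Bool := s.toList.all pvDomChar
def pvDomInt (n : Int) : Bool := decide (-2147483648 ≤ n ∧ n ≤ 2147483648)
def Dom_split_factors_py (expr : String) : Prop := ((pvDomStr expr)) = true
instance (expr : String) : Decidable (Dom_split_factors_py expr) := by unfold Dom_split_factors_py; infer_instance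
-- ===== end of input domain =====

-- B replaces A's index-based outer loop with nested rescanning inner loops by a single
-- character-streaming pass carrying a paren-depth counter and a token buffer (objective: simpler).

-- ===== PORT A =====
-- inner while loop 'while j < n and depth > 0': returns (chars consumed, remainder, final depth)
def pvParenScan : List Char → Nat → (List Char × List Char × Nat)
  | [], d => ([], [], d)
  | c :: rest, d =>
    if d = 0 then ([], c :: rest, 0)
    else
      let d' := if c = '(' then d + 1 else if c = ')' then d - 1 else d
      let p := pvParenScan rest d'
      (c :: p.1, p.2.1, p.2.2)

-- inner while loop 'while j < n and s[j] not in "()*"': returns (token chars, remainder)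
def pvBareScan : List Char → (List Char × List Char)
  | [] => ([], [])
  | c :: rest =>
    if c = '(' ∨ c = ')' ∨ c = '*' then ([], c :: rest)
    else
      let b := pvBareScan rest
      (c :: b.1, b.2)

theorem pvBareScan_snd_le (cs : List Char) : (pvBareScan cs).2.length ≤ cs.length := by
  induction cs with
  | nil => simp [pvBareScan]
  | cons c rest ih =>
    simp only [pvBareScan]
    split
    · simp
    · simpa using Nat.le_succ_of_le ih

theorem pvParenScan_snd_le (cs : List Char) : ∀ d, (pvParenScan cs d).2.1.length ≤ cs.length := by
  induction cs with
  | nil => intro d; simp [pvParenScan]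
  | cons c rest ih =>
    intro d
    simp only [pvParenScan]
    split
    · simp
    · simpa using Nat.le_succ_of_le (ih _)

-- A's outer while loop
def pvLoopA : List Char → List String
  | [] => []
  | c :: rest =>
    if c = '*' then pvLoopA rest
    else if c = '(' then
      let p := pvParenScan rest 1
      if p.2.2 ≠ 0 then [String.ofList ('(' :: rest)]           -- unbalanced: token = s[i:], i = n
      else String.ofList ('(' :: p.1) :: pvLoopA p.2.1
    else
      let b := pvBareScan (c :: rest)
      if b.1 = [] then pvLoopA rest                          -- j == i: skip one char
      else String.ofList b.1 :: pvLoopA b.2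
  termination_by cs => cs.length
  decreasing_by
  · simp
  · have := pvParenScan_snd_le rest 1; simp; omega
  · simp
  · rename_i hb
    by_cases hsp : c = '(' ∨ c = ')' ∨ c = '*'
    · have h1 : pvBareScan (c :: rest) = ([], c :: rest) := by
        rw [pvBareScan, if_pos hsp]
      exact absurd (by show (pvBareScan (c :: rest)).1 = []; rw [h1]) hb
    · show (pvBareScan (c :: rest)).2.length < (c :: rest).length
      rw [pvBareScan, if_neg hsp]
      have := pvBareScan_snd_le rest
      simp
      omega

def split_factors_py (expr : String) : List String :=
  (pvLoopA (PySem.Str.replace expr " " "").toList).filter (fun f => f ≠ "")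

-- ===== PORT B =====
-- B's single for-loop; state = (depth, buffer); flush appends the buffer if non-empty
def pvLoopB : List Char → Nat → List Char → List String
  | [], _, buf => if buf = [] then [] else [String.ofList buf]
  | c :: rest, 0, buf =>
    if c = '*' then
      if buf = [] then pvLoopB rest 0 [] else String.ofList buf :: pvLoopB rest 0 []
    else if c = '(' then
      if buf = [] then pvLoopB rest 1 ['('] else String.ofList buf :: pvLoopB rest 1 ['(']
    else if c = ')' then
      if buf = [] then pvLoopB rest 0 [] else String.ofList buf :: pvLoopB rest 0 []
    else pvLoopB rest 0 (buf ++ [c])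
  | c :: rest, d + 1, buf =>
    if c = '(' then pvLoopB rest (d + 2) (buf ++ [c])
    else if c = ')' then
      if d = 0 then String.ofList (buf ++ [c]) :: pvLoopB rest 0 []
      else pvLoopB rest d (buf ++ [c])
    else pvLoopB rest (d + 1) (buf ++ [c])

def split_factors_py_alt (expr : String) : List String :=
  pvLoopB (PySem.Str.replace expr " " "").toList 0 []

-- ===== PRECONDITION & SPEC =====
def Spec_split_factors_py (expr : String) (out : List String) : Prop := out = split_factors_py_alt expr
instance (expr : String) (out : List String) : Decidable (Spec_split_factors_py expr out) := by unfold Spec_split_factors_py; infer_instance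

-- ===== CLAIM (what is proved, stated in full; the proofs are below) =====
def Claim_equal_split_factors_py : Prop := ∀ (expr : String), Dom_split_factors_py expr → Spec_split_factors_py expr (split_factors_py expr)

-- ===== LEMMAS AND PROOFS =====

theorem pvParenScan_zero (cs : List Char) : pvParenScan cs 0 = ([], cs, 0) := by
  cases cs <;> simp [pvParenScan]

theorem pvLoopB_paren (cs : List Char) : ∀ d buf, d ≠ 0 → buf ≠ [] →
    pvLoopB cs d buf =
      (if (pvParenScan cs d).2.2 = 0
       then String.ofList (buf ++ (pvParenScan cs d).1) :: pvLoopB (pvParenScan cs d).2.1 0 []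
       else [String.ofList (buf ++ cs)]) := by
  induction cs with
  | nil =>
    intro d buf hd hbuf
    simp [pvLoopB, pvParenScan, hbuf, hd]
  | cons c rest ih =>
    intro d buf hd hbuf
    obtain ⟨k, rfl⟩ : ∃ k, d = k + 1 := ⟨d - 1, by omega⟩
    by_cases hc : c = '('
    · subst hc
      have hih := ih (k + 2) (buf ++ ['(']) (by omega) (by simp)
      simp only [pvLoopB] at *
      simp only [pvParenScan, if_neg (by omega : ¬ k + 1 = 0)]
      simpa using hih
    · by_cases hc2 : c = ')'
      · subst hc2
        cases k with
        | zero =>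
          simp only [pvLoopB]
          simp only [pvParenScan, if_neg (by omega : ¬ (1 : Nat) = 0),
            if_neg (by decide : ¬ (')' : Char) = '(')]
          simp [pvParenScan_zero]
        | succ k =>
          have hih := ih (k + 1) (buf ++ [')']) (by omega) (by simp)
          simp only [pvLoopB,
            if_neg (by omega : ¬ k + 1 = 0)] at *
          simp only [pvParenScan, if_neg (by omega : ¬ k + 1 + 1 = 0),
            if_neg (by decide : ¬ (')' : Char) = '(')]
          simpa using hih
      · have hih := ih (k + 1) (buf ++ [c]) (by omega) (by simp)
        simp only [pvLoopB, if_neg hc, if_neg hc2] at *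
        simp only [pvParenScan, if_neg (by omega : ¬ k + 1 = 0), if_neg hc, if_neg hc2]
        simpa using hih

theorem pvLoopB_bare (cs : List Char) : ∀ buf, buf ≠ [] →
    pvLoopB cs 0 buf = String.ofList (buf ++ (pvBareScan cs).1) :: pvLoopB (pvBareScan cs).2 0 [] := by
  induction cs with
  | nil =>
    intro buf hbuf
    simp [pvLoopB, pvBareScan, hbuf]
  | cons c rest ih =>
    intro buf hbuf
    by_cases h1 : c = '*'
    · subst h1
      simp [pvLoopB, pvBareScan, hbuf]
    · by_cases h2 : c = '('
      · subst h2
        simp [pvLoopB, pvBareScan, hbuf]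
      · by_cases h3 : c = ')'
        · subst h3
          simp [pvLoopB, pvBareScan, hbuf]
        · have hsp : ¬ (c = '(' ∨ c = ')' ∨ c = '*') := by tauto
          have hih := ih (buf ++ [c]) (by simp)
          simp only [pvLoopB, if_neg h1, if_neg h2, if_neg h3]
          rw [hih]
          simp [pvBareScan, hsp]

theorem pvLoopA_star (rest : List Char) : pvLoopA ('*' :: rest) = pvLoopA rest := by
  simp [pvLoopA]

theorem pvLoopA_close (rest : List Char) : pvLoopA (')' :: rest) = pvLoopA rest := by
  simp [pvLoopA, pvBareScan]

theorem pvLoopA_open (rest : List Char) : pvLoopA ('(' :: rest) =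
    (if (pvParenScan rest 1).2.2 = 0
     then String.ofList ('(' :: (pvParenScan rest 1).1) :: pvLoopA (pvParenScan rest 1).2.1
     else [String.ofList ('(' :: rest)]) := by
  by_cases h : (pvParenScan rest 1).2.2 = 0 <;> simp [pvLoopA, h]

theorem pvLoopA_ord (c : Char) (rest : List Char) (h : ¬ (c = '(' ∨ c = ')' ∨ c = '*')) :
    pvLoopA (c :: rest) = String.ofList (c :: (pvBareScan rest).1) :: pvLoopA (pvBareScan rest).2 := by
  have h1 : ¬ c = '*' := by tauto
  have h2 : ¬ c = '(' := by tauto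
  have hbs : pvBareScan (c :: rest) = (c :: (pvBareScan rest).1, (pvBareScan rest).2) := by
    rw [pvBareScan, if_neg h]
  simp [pvLoopA, h1, h2, hbs]

theorem pvLoopB_star (rest : List Char) : pvLoopB ('*' :: rest) 0 [] = pvLoopB rest 0 [] := by
  simp [pvLoopB]

theorem pvLoopB_close (rest : List Char) : pvLoopB (')' :: rest) 0 [] = pvLoopB rest 0 [] := by
  simp [pvLoopB]

theorem pvLoopB_open (rest : List Char) : pvLoopB ('(' :: rest) 0 [] = pvLoopB rest 1 ['('] := by
  simp [pvLoopB]

theorem pvLoopB_ord (c : Char) (rest : List Char) (h : ¬ (c = '(' ∨ c = ')' ∨ c = '*')) :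
    pvLoopB (c :: rest) 0 [] = pvLoopB rest 0 [c] := by
  have h1 : ¬ c = '*' := by tauto
  have h2 : ¬ c = '(' := by tauto
  have h3 : ¬ c = ')' := by tauto
  simp [pvLoopB, h1, h2, h3]

theorem pvLoopB_eq_pvLoopA (cs : List Char) : pvLoopB cs 0 [] = pvLoopA cs := by
  induction hn : cs.length using Nat.strong_induction_on generalizing cs with
  | _ n ih =>
  subst hn
  match cs with
  | [] => simp [pvLoopB, pvLoopA]
  | c :: rest =>
    have IH : ∀ ds : List Char, ds.length < (c :: rest).length → pvLoopB ds 0 [] = pvLoopA ds :=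
      fun ds h => ih ds.length h ds rfl
    by_cases h1 : c = '*'
    · subst h1
      rw [pvLoopB_star, pvLoopA_star]
      exact IH rest (by simp)
    · by_cases h2 : c = '('
      · subst h2
        rw [pvLoopB_open, pvLoopA_open,
          pvLoopB_paren rest 1 ['('] (by omega) (by simp)]
        by_cases h0 : (pvParenScan rest 1).2.2 = 0
        · rw [if_pos h0, if_pos h0,
            IH (pvParenScan rest 1).2.1 (Nat.lt_succ_of_le (pvParenScan_snd_le rest 1))]
          rfl
        · rw [if_neg h0, if_neg h0]
          rfl
      · by_cases h3 : c = ')'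
        · subst h3
          rw [pvLoopB_close, pvLoopA_close]
          exact IH rest (by simp)
        · have h : ¬ (c = '(' ∨ c = ')' ∨ c = '*') := by tauto
          rw [pvLoopB_ord c rest h, pvLoopA_ord c rest h,
            pvLoopB_bare rest [c] (by simp),
            IH (pvBareScan rest).2 (Nat.lt_succ_of_le (pvBareScan_snd_le rest))]
          rfl

theorem pvLoopA_ne_empty (cs : List Char) : ∀ f ∈ pvLoopA cs, f ≠ "" := by
  induction hn : cs.length using Nat.strong_induction_on generalizing cs with
  | _ n ih =>
  subst hn
  match cs with
  | [] => simp [pvLoopA]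
  | c :: rest =>
    have IH : ∀ ds : List Char, ds.length < (c :: rest).length → ∀ f ∈ pvLoopA ds, f ≠ "" :=
      fun ds h => ih ds.length h ds rfl
    have hne : ∀ (d : Char) (l : List Char), String.ofList (d :: l) ≠ "" := by
      intro d l hcon
      have h2 : (String.ofList (d :: l)).toList = ("" : String).toList := by rw [hcon]
      simp at h2
    by_cases h1 : c = '*'
    · subst h1
      rw [pvLoopA_star]
      exact IH rest (by simp)
    · by_cases h2 : c = '('
      · subst h2
        rw [pvLoopA_open]
        by_cases h0 : (pvParenScan rest 1).2.2 = 0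
        · rw [if_pos h0]
          intro f hf
          rcases List.mem_cons.1 hf with h | h
          · subst h; exact hne _ _
          · exact IH (pvParenScan rest 1).2.1 (Nat.lt_succ_of_le (pvParenScan_snd_le rest 1)) f h
        · rw [if_neg h0]
          intro f hf
          rcases List.mem_cons.1 hf with h | h
          · subst h; exact hne _ _
          · simp at h
      · by_cases h3 : c = ')'
        · subst h3
          rw [pvLoopA_close]
          exact IH rest (by simp)
        · have h : ¬ (c = '(' ∨ c = ')' ∨ c = '*') :=
            fun hx => hx.elim (fun a => h2 a) (fun b => b.elim (fun a => h3 a) (fun a => h1 a))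
          rw [pvLoopA_ord c rest h]
          intro f hf
          rcases List.mem_cons.1 hf with hh | hh
          · subst hh; exact hne _ _
          · exact IH (pvBareScan rest).2 (Nat.lt_succ_of_le (pvBareScan_snd_le rest)) f hh

-- ===== VERDICT (by name: the statement is the Claim_ definition above) =====
theorem split_factors_py_spec : Claim_equal_split_factors_py := by
  intro expr _
  unfold Spec_split_factors_py split_factors_py split_factors_py_alt
  rw [List.filter_eq_self.2 (by intro f hf; simpa using pvLoopA_ne_empty _ f hf)]
  exact (pvLoopB_eq_pvLoopA _).symm
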